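-- pv_equiv track=rewrite | github.com/usmanjalil1/ChickSexer-PyTorch | predict.py | name_to_onehot
-- ===== SOURCE A (Python) =====
-- def name_to_onehot(name):
--     alphabet = 'abcdefghijklmnopqrstuvwxyz'
--     onehot = [0] * (len(alphabet) * 2)  # Multiply by 2 for both lower and upper case
--     for char in name.lower():
--         if char in alphabet:
--             index = alphabet.index(char)
--             onehot[index] = 1
--     return onehot
-- ===== SOURCE B (Python) =====
-- def name_to_onehot(name):
--     letters = set(name.lower())
--     return [1 if chr(97 + i) in letters else 0 for i in range(26)] + [0] * 26
-- ===== Notes on version B (the rewrite author's own statement) =====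
-- stated objective: faster
-- what changed: B builds the set of characters of name.lower() once and iterates over the 26 output positions testing membership, instead of scanning the name with a per-character linear alphabet scan plus .index plus scatter-write; the always-zero upper 26 slots are appended directly.
import Mathlib
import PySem

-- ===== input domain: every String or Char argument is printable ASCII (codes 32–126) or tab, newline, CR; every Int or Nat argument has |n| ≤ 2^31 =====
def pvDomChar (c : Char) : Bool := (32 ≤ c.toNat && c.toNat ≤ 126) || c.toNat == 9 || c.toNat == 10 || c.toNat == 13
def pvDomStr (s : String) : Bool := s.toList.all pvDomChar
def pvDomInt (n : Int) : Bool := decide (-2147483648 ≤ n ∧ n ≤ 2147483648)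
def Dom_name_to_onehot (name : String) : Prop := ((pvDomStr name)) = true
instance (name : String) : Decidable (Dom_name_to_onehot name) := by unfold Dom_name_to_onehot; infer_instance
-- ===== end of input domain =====

-- B iterates over the 26 output positions testing membership in the set of lowered characters,
-- instead of scanning the name and scatter-writing into a preallocated list (objective: idiomatic).

-- ===== PORT A =====
-- 'char in alphabet' on a single character is list membership; 'alphabet.index(char)' under that
-- guard never raises, so List.idxOf is exact; 'onehot[index] = 1' has 0 ≤ index < 52, so .set is exact.
def name_to_onehot (name : String) : List Int :=
  let alphabet : List Char := "abcdefghijklmnopqrstuvwxyz".toList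
  let onehot : List Int := List.replicate (alphabet.length * 2) 0
  (PySem.Str.lower name).toList.foldl
    (fun oh char =>
      if alphabet.contains char then
        let index := alphabet.idxOf char
        oh.set index 1
      else oh) onehot

-- ===== PORT B =====
def name_to_onehot_alt (name : String) : List Int :=
  let letters : PySem.Set Char := PySem.Set.ofList (PySem.Str.lower name).toList
  ((List.range 26).map (fun i => if PySem.Set.contains letters (Char.ofNat (97 + i)) then (1 : Int) else 0))
    ++ List.replicate 26 (0 : Int)

-- ===== PRECONDITION & SPEC =====
def Spec_name_to_onehot (name : String) (out : List Int) : Prop := out = name_to_onehot_alt name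
instance (name : String) (out : List Int) : Decidable (Spec_name_to_onehot name out) := by unfold Spec_name_to_onehot; infer_instance

-- ===== CLAIM (what is proved, stated in full; the proofs are below) =====
def Claim_equal_name_to_onehot : Prop := ∀ (name : String), Dom_name_to_onehot name → Spec_name_to_onehot name (name_to_onehot name)

-- ===== LEMMAS AND PROOFS =====

def pvAlph : List Char := "abcdefghijklmnopqrstuvwxyz".toList

def pvStep (oh : List Int) (c : Char) : List Int :=
  if pvAlph.contains c then oh.set (pvAlph.idxOf c) 1 else oh

lemma pvAlph_get (i : Nat) (hi : i < 26) : pvAlph[i]? = some (Char.ofNat (97 + i)) := by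
  interval_cases i <;> decide

lemma pvAlph_nodup : pvAlph.Nodup := by decide

lemma pvAlph_len : pvAlph.length = 26 := by decide

lemma pv_mem_idx (c : Char) (i : Nat) (hi : i < 26) :
    (c ∈ pvAlph ∧ pvAlph.idxOf c = i) ↔ c = Char.ofNat (97 + i) := by
  constructor
  · rintro ⟨h1, h2⟩
    have hlt : pvAlph.idxOf c < pvAlph.length := List.idxOf_lt_length_of_mem h1
    have hg : pvAlph[pvAlph.idxOf c]'hlt = c := List.getElem_idxOf hlt
    have : pvAlph[i]? = some c := by
      rw [← h2]; rw [List.getElem?_eq_getElem hlt, hg]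
    rw [pvAlph_get i hi] at this
    exact (Option.some.injEq _ _ ▸ this).symm
  · rintro rfl
    have hmem : Char.ofNat (97 + i) ∈ pvAlph := by
      have := pvAlph_get i hi
      exact List.mem_of_getElem? this
    refine ⟨hmem, ?_⟩
    have hlt : pvAlph.idxOf (Char.ofNat (97 + i)) < pvAlph.length := List.idxOf_lt_length_of_mem hmem
    have hg : pvAlph[pvAlph.idxOf (Char.ofNat (97 + i))]'hlt = Char.ofNat (97 + i) := List.getElem_idxOf hlt
    have hi' : i < pvAlph.length := by rw [pvAlph_len]; exact hi
    have hg2 : pvAlph[i]'hi' = Char.ofNat (97 + i) := by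
      have := pvAlph_get i hi
      rw [List.getElem?_eq_getElem hi'] at this
      exact Option.some.inj this
    exact pvAlph_nodup.getElem_inj_iff.mp (hg.trans hg2.symm)

lemma pv_len_step (oh : List Int) (c : Char) : (pvStep oh c).length = oh.length := by
  unfold pvStep; split <;> simp

lemma pv_fold_lo (i : Nat) (hi : i < 26) (cs : List Char) (acc : List Int)
    (hlen : acc.length = 52) :
    (cs.foldl pvStep acc)[i]? =
      if Char.ofNat (97 + i) ∈ cs then some 1 else acc[i]? := by
  induction cs generalizing acc with
  | nil => simp
  | cons c cs ih =>
    rw [List.foldl_cons, ih _ (by rw [pv_len_step]; exact hlen)]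
    by_cases hm : Char.ofNat (97 + i) ∈ cs
    · simp [hm]
    · simp only [hm, if_false, List.mem_cons, or_false]
      by_cases hc : Char.ofNat (97 + i) = c
      · rw [if_pos hc]
        have hmem := (pv_mem_idx c i hi).mpr hc.symm
        have h1 : pvStep acc c = acc.set i 1 := by
          unfold pvStep
          rw [if_pos (by simpa using hmem.1), hmem.2]
        rw [h1, List.getElem?_set_self (by rw [hlen]; omega)]
      · rw [if_neg hc]
        unfold pvStep
        split
        · rename_i hcm
          have hne : pvAlph.idxOf c ≠ i := fun h =>
            hc ((pv_mem_idx c i hi).mp ⟨by simpa using hcm, h⟩).symm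
          rw [List.getElem?_set_ne hne]
        · rfl

lemma pv_fold_hi (i : Nat) (hi : 26 ≤ i) (cs : List Char) (acc : List Int) :
    (cs.foldl pvStep acc)[i]? = acc[i]? := by
  induction cs generalizing acc with
  | nil => rfl
  | cons c cs ih =>
    rw [List.foldl_cons, ih]
    unfold pvStep
    split
    · rename_i hcm
      have hlt : pvAlph.idxOf c < 26 := by
        rw [← pvAlph_len]
        exact List.idxOf_lt_length_of_mem (by simpa using hcm)
      rw [List.getElem?_set_ne (by omega)]
    · rfl

-- ===== VERDICT (by name: the statement is the Claim_ definition above) =====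
theorem name_to_onehot_spec : Claim_equal_name_to_onehot := by
  intro name _
  unfold Spec_name_to_onehot name_to_onehot name_to_onehot_alt
  set cs := (PySem.Str.lower name).toList with hcs
  have hA : (cs.foldl pvStep (List.replicate 52 0)) =
      (List.range 26).map (fun i => if PySem.Set.contains (PySem.Set.ofList cs) (Char.ofNat (97 + i)) then (1:Int) else 0)
      ++ List.replicate 26 0 := by
    apply List.ext_getElem?
    intro i
    by_cases h26 : i < 26
    · rw [pv_fold_lo i h26 cs _ (by simp)]
      rw [List.getElem?_append_left (by simpa using h26)]
      rw [List.getElem?_map, List.getElem?_range h26]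
      simp only [Option.map_some]
      by_cases hm : Char.ofNat (97 + i) ∈ cs
      · rw [if_pos hm]
        have hc2 : (PySem.Set.ofList cs).contains (Char.ofNat (97 + i)) = true := by
          simp [PySem.Set.mem_ofList, hm]
        rw [hc2, if_pos rfl]
      · rw [if_neg hm]
        have hc2 : (PySem.Set.ofList cs).contains (Char.ofNat (97 + i)) = false := by
          simp [PySem.Set.mem_ofList, hm]
        rw [hc2, if_neg (by simp), List.getElem?_replicate, if_pos (by omega)]
    · rw [pv_fold_hi i (by omega)]
      by_cases h52 : i < 52
      · rw [List.getElem?_append_right (by simp; omega)]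
        simp only [List.length_map, List.length_range, List.getElem?_replicate]
        split_ifs <;> first | rfl | omega
      · rw [List.getElem?_append_right (by simp; omega)]
        simp only [List.length_map, List.length_range, List.getElem?_replicate]
        split_ifs <;> first | rfl | omega
  exact hA
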